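-- pv_equiv track=rewrite | github.com/ShmidtS/hypercoplexAI | src/core/hypercomplex.py | _sort_with_parity
-- ===== SOURCE A (Python) =====
-- def _sort_with_parity(arr):
--     """Bubble sort returning (sorted_list, parity) where parity is 0 (even) or 1 (odd)."""
--     arr = list(arr)
--     parity = 0
--     n = len(arr)
--     for i in range(n):
--         for j in range(0, n - i - 1):
--             if arr[j] > arr[j + 1]:
--                 arr[j], arr[j + 1] = arr[j + 1], arr[j]
--                 parity ^= 1
--     return arr, parity
-- ===== SOURCE B (Python) =====
-- def _sort_with_parity(arr):
--     """Merge sort counting inversions; parity = inversion count % 2."""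
--     def msort(a):
--         if len(a) < 2:
--             return a, 0
--         mid = len(a) // 2
--         left, inv_l = msort(a[:mid])
--         right, inv_r = msort(a[mid:])
--         merged = []
--         inv = inv_l + inv_r
--         i = j = 0
--         while i < len(left) and j < len(right):
--             if left[i] <= right[j]:
--                 merged.append(left[i])
--                 i += 1
--             else:
--                 inv += len(left) - i
--                 merged.append(right[j])
--                 j += 1
--         merged.extend(left[i:])
--         merged.extend(right[j:])
--         return merged, inv
--     s, inv = msort(list(arr))
--     return s, inv % 2
-- ===== Notes on version B (the rewrite author's own statement) =====
-- stated objective: faster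
-- what changed: Replaces the in-place bubble sort that counts swaps with a top-down merge sort that counts inversions, returning parity = inversions mod 2.
import Mathlib
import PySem

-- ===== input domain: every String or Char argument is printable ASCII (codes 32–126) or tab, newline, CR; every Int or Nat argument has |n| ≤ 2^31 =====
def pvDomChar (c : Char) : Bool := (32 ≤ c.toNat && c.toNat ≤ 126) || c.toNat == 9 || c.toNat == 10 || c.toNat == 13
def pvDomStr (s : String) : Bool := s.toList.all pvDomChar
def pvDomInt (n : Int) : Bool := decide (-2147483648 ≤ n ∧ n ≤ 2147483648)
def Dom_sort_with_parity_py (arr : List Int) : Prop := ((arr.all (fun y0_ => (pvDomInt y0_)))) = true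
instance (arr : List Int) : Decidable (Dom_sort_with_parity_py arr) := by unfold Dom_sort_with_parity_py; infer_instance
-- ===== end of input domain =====

-- B replaces A's quadratic bubble sort (parity = swap count mod 2) by a merge sort that
-- counts inversions (parity = inversion count mod 2); measurably faster asymptotically.


-- ===== PORT A =====
-- one iteration of A's inner loop body at index j (reads arr[j], arr[j+1]; conditional swap, parity ^= 1)
def pvBubStep (st : List Int × Int) (j : Int) : List Int × Int :=
  let x := PySem.List.pyGetD st.1 j 0
  let y := PySem.List.pyGetD st.1 (j + 1) 0
  if y < x then
    (PySem.List.pySetD (PySem.List.pySetD st.1 j y) (j + 1) x, PySem.Int.bxor st.2 1)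
  else st

def sort_with_parity_py (arr : List Int) : List Int × Int :=
  let n : Int := (arr.length : Int)
  (PySem.List.pyRange 0 n 1).foldl
    (fun st i => (PySem.List.pyRange 0 (n - i - 1) 1).foldl pvBubStep st)
    (arr, 0)

-- ===== PORT B =====
-- B's merge of two runs; the while loop on indices i/j is transcribed as recursion on the
-- two remaining suffixes, 'len(left) - i' is the length of the remaining left suffix.
def pvMerge : List Int → List Int → List Int × Int
  | [], r => (r, 0)
  | a :: l, [] => (a :: l, 0)
  | a :: l, b :: r =>
    if a ≤ b then
      let p := pvMerge l (b :: r)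
      (a :: p.1, p.2)
    else
      let p := pvMerge (a :: l) r
      (b :: p.1, p.2 + ((a :: l).length : Int))
termination_by l r => l.length + r.length

def pvMsort (a : List Int) : List Int × Int :=
  if a.length < 2 then (a, 0)
  else
    let mid := a.length / 2
    let pl := pvMsort (a.take mid)
    let pr := pvMsort (a.drop mid)
    let pm := pvMerge pl.1 pr.1
    (pm.1, pl.2 + pr.2 + pm.2)
termination_by a.length
decreasing_by
  · simp [List.length_take]; omega
  · simp [List.length_drop]; omega

def sort_with_parity_py_alt (arr : List Int) : List Int × Int :=
  let p := pvMsort arr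
  (p.1, PySem.Int.mod p.2 2)

-- ===== PRECONDITION & SPEC =====
def Spec_sort_with_parity_py (arr : List Int) (out : List Int × Int) : Prop := out = sort_with_parity_py_alt arr
instance (arr : List Int) (out : List Int × Int) : Decidable (Spec_sort_with_parity_py arr out) := by unfold Spec_sort_with_parity_py; infer_instance

-- ===== CLAIM (what is proved, stated in full; the proofs are below) =====
def Claim_equal_sort_with_parity_py : Prop := ∀ (arr : List Int), Dom_sort_with_parity_py arr → Spec_sort_with_parity_py arr (sort_with_parity_py arr)

-- ===== LEMMAS AND PROOFS =====

-- inversion count of a list, and cross inversions between two lists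
def pvInv : List Int → Nat
  | [] => 0
  | x :: t => t.countP (fun y => decide (y < x)) + pvInv t

def pvCross (u v : List Int) : Nat :=
  (u.map (fun x => v.countP (fun y => decide (y < x)))).sum

-- structural model of A's inner loop: one bounded bubble pass, returning (list, #swaps)
def pvPass : List Int → Nat → List Int × Nat
  | l, 0 => (l, 0)
  | [], _ + 1 => ([], 0)
  | [a], _ + 1 => ([a], 0)
  | a :: b :: t, m + 1 =>
    if b < a then
      let p := pvPass (a :: t) m
      (b :: p.1, p.2 + 1)
    else
      let p := pvPass (b :: t) m
      (a :: p.1, p.2)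

theorem pvCross_nil (v : List Int) : pvCross [] v = 0 := rfl

theorem pvCross_cons (x : Int) (u v : List Int) :
    pvCross (x :: u) v = v.countP (fun y => decide (y < x)) + pvCross u v := by
  simp [pvCross]

theorem pvCross_nil_right (u : List Int) : pvCross u [] = 0 := by
  induction u with
  | nil => rfl
  | cons x u ih => simp [pvCross_cons, ih]

theorem pvCross_cons_right (u : List Int) (b : Int) (v : List Int) :
    pvCross u (b :: v) = u.countP (fun x => decide (b < x)) + pvCross u v := by
  induction u with
  | nil => simp [pvCross_nil]
  | cons x u ih =>
    simp only [pvCross_cons, ih, List.countP_cons]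
    omega

theorem pvCross_perm_left {u u' : List Int} (v : List Int) (h : u.Perm u') :
    pvCross u v = pvCross u' v := (h.map _).sum_eq

theorem pvCross_perm_right (u : List Int) {v v' : List Int} (h : v.Perm v') :
    pvCross u v = pvCross u v' := by
  simp [pvCross, h.countP_eq]

theorem pvInv_append (u v : List Int) :
    pvInv (u ++ v) = pvInv u + pvInv v + pvCross u v := by
  induction u with
  | nil => simp [pvInv, pvCross_nil]
  | cons x u ih =>
    simp only [List.cons_append, pvInv, ih, List.countP_append, pvCross_cons]
    omega

theorem pvInv_eq_zero_of_sorted {l : List Int} (h : l.Pairwise (· ≤ ·)) : pvInv l = 0 := by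
  induction l with
  | nil => rfl
  | cons x t ih =>
    rcases List.pairwise_cons.mp h with ⟨hx, ht⟩
    have hc : t.countP (fun y => decide (y < x)) = 0 := by
      rw [List.countP_eq_zero]
      intro y hy
      simpa using not_lt.mpr (hx y hy)
    simp [pvInv, hc, ih ht]

theorem pvMerge_spec : ∀ (u v : List Int), u.Pairwise (· ≤ ·) → v.Pairwise (· ≤ ·) →
    (pvMerge u v).1.Perm (u ++ v) ∧ (pvMerge u v).1.Pairwise (· ≤ ·) ∧
      (pvMerge u v).2 = (pvCross u v : Nat) := by
  intro u
  induction u with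
  | nil =>
    intro v _ hv
    exact ⟨by simp [pvMerge], by simpa [pvMerge] using hv, by simp [pvMerge, pvCross_nil]⟩
  | cons a l ihu =>
    intro v
    induction v with
    | nil =>
      intro hu _
      exact ⟨by simp [pvMerge], by simpa [pvMerge] using hu,
        by simp [pvMerge, pvCross_nil_right]⟩
    | cons b r ihv =>
      intro hu hv
      rcases List.pairwise_cons.mp hu with ⟨ha, hl⟩
      rcases List.pairwise_cons.mp hv with ⟨hb, hr⟩
      by_cases hab : a ≤ b
      · obtain ⟨ihp, ihs, ihc⟩ := ihu (b :: r) hl hv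
        simp only [pvMerge, if_pos hab]
        refine ⟨?_, ?_, ?_⟩
        · simpa using ihp.cons a
        · refine List.pairwise_cons.mpr ⟨?_, ihs⟩
          intro z hz
          have hz' : z ∈ l ++ b :: r := ihp.mem_iff.mp hz
          rcases List.mem_append.mp hz' with h1 | h2
          · exact ha z h1
          · rcases List.mem_cons.mp h2 with rfl | h3
            · exact hab
            · exact le_trans hab (hb z h3)
        · have hz : (b :: r).countP (fun y => decide (y < a)) = 0 := by
            rw [List.countP_eq_zero]
            intro y hy
            rcases List.mem_cons.mp hy with rfl | hy'
            · simpa using not_lt.mpr hab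
            · simpa using not_lt.mpr (le_trans hab (hb y hy'))
          simp only [pvCross_cons, hz, Nat.zero_add]
          exact ihc
      · have hba : b < a := lt_of_not_ge hab
        obtain ⟨ihp, ihs, ihc⟩ := ihv hu hr
        simp only [pvMerge, if_neg hab]
        refine ⟨?_, ?_, ?_⟩
        · exact (ihp.cons b).trans (List.perm_middle).symm
        · refine List.pairwise_cons.mpr ⟨?_, ihs⟩
          intro z hz
          have hz' : z ∈ (a :: l) ++ r := ihp.mem_iff.mp hz
          rcases List.mem_append.mp hz' with h1 | h2
          · rcases List.mem_cons.mp h1 with rfl | h3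
            · exact le_of_lt hba
            · exact le_trans (le_of_lt hba) (ha z h3)
          · exact hb z h2
        · have hlen : (a :: l).countP (fun x => decide (b < x)) = (a :: l).length := by
            rw [List.countP_eq_length]
            intro z hz
            rcases List.mem_cons.mp hz with rfl | h3
            · simpa using hba
            · simpa using lt_of_lt_of_le hba (ha z h3)
          rw [pvCross_cons_right, hlen, ihc]
          push_cast
          ring

theorem pvMsort_spec : ∀ (a : List Int),
    (pvMsort a).1.Perm a ∧ (pvMsort a).1.Pairwise (· ≤ ·) ∧
      (pvMsort a).2 = (pvInv a : Nat) := by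
  intro a
  induction hn : a.length using Nat.strong_induction_on generalizing a with
  | _ n ih =>
  subst hn
  by_cases h : a.length < 2
  · rw [pvMsort, if_pos h]
    rcases a with _ | ⟨x, _ | ⟨y, t⟩⟩
    · exact ⟨List.Perm.refl _, by simp, by simp [pvInv]⟩
    · exact ⟨List.Perm.refl _, by simp, by simp [pvInv]⟩
    · simp at h
  · rw [pvMsort, if_neg h]
    have h2 : 2 ≤ a.length := by omega
    have hmid1 : (a.take (a.length / 2)).length < a.length := by
      simp [List.length_take]; omega
    have hmid2 : (a.drop (a.length / 2)).length < a.length := by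
      simp [List.length_drop]; omega
    obtain ⟨p1, s1, c1⟩ := ih _ hmid1 _ rfl
    obtain ⟨p2, s2, c2⟩ := ih _ hmid2 _ rfl
    obtain ⟨mp, ms, mc⟩ := pvMerge_spec _ _ s1 s2
    refine ⟨?_, ms, ?_⟩
    · refine mp.trans ?_
      have := (p1.append p2)
      refine this.trans ?_
      rw [List.take_append_drop]
    · have hx : pvCross (pvMsort (a.take (a.length / 2))).1 (pvMsort (a.drop (a.length / 2))).1
          = pvCross (a.take (a.length / 2)) (a.drop (a.length / 2)) := by
        rw [pvCross_perm_left _ p1, pvCross_perm_right _ p2]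
      have hinv : pvInv a = pvInv (a.take (a.length / 2)) + pvInv (a.drop (a.length / 2)) +
          pvCross (a.take (a.length / 2)) (a.drop (a.length / 2)) := by
        conv_lhs => rw [← List.take_append_drop (a.length / 2) a]
        exact pvInv_append _ _
      show (pvMsort (a.take (a.length / 2))).2 + (pvMsort (a.drop (a.length / 2))).2
          + (pvMerge (pvMsort (a.take (a.length / 2))).1 (pvMsort (a.drop (a.length / 2))).1).2
          = (pvInv a : Nat)
      rw [c1, c2, mc, hx, hinv]
      push_cast
      ring

-- ---- A-side: the indexed inner loop is the structural pass pvPass ----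

theorem pvBubStep_natCast (l : List Int) (p : Int) (k : Nat) :
    pvBubStep (l, p) (k : Int) =
      if l.getD (k + 1) 0 < l.getD k 0
      then ((l.set k (l.getD (k + 1) 0)).set (k + 1) (l.getD k 0), PySem.Int.bxor p 1)
      else (l, p) := by
  have h1 : (k : Int) + 1 = ((k + 1 : Nat) : Int) := by push_cast; ring
  simp only [pvBubStep, h1, PySem.List.pyGetD_natCast, PySem.List.pySetD_natCast]

theorem pvBubStep_cons (c : Int) (l : List Int) (p : Int) (k : Nat) :
    pvBubStep (c :: l, p) ((k + 1 : Nat) : Int)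
      = (c :: (pvBubStep (l, p) (k : Int)).1, (pvBubStep (l, p) (k : Int)).2) := by
  rw [pvBubStep_natCast, pvBubStep_natCast]
  simp only [List.getD_cons_succ, List.set_cons_succ]
  split <;> simp

theorem foldl_bubstep_cons : ∀ (js : List Nat) (c : Int) (l : List Int) (p : Int),
    js.foldl (fun st k => pvBubStep st ((k + 1 : Nat) : Int)) (c :: l, p)
      = (c :: (js.foldl (fun st k => pvBubStep st ((k : Nat) : Int)) (l, p)).1,
            (js.foldl (fun st k => pvBubStep st ((k : Nat) : Int)) (l, p)).2) := by
  intro js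
  induction js with
  | nil => simp
  | cons k js ih =>
    intro c l p
    simp only [List.foldl_cons, pvBubStep_cons]
    rw [ih]

theorem pvXor_mod (s : Nat) :
    PySem.Int.bxor ((s % 2 : Nat) : Int) 1 = (((s + 1) % 2 : Nat) : Int) := by
  rcases Nat.mod_two_eq_zero_or_one s with h | h
  · have h2 : (s + 1) % 2 = 1 := by omega
    rw [h, h2]; decide
  · have h2 : (s + 1) % 2 = 0 := by omega
    rw [h, h2]; decide

theorem inner_bridge : ∀ (m : Nat) (l : List Int) (s : Nat), m + 1 ≤ l.length →
    (List.range m).foldl (fun st k => pvBubStep st ((k : Nat) : Int)) (l, ((s % 2 : Nat) : Int))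
      = ((pvPass l m).1, (((s + (pvPass l m).2) % 2 : Nat) : Int)) := by
  intro m
  induction m with
  | zero => intro l s _; simp [pvPass]
  | succ m ih =>
    intro l s hlen
    rcases l with _ | ⟨a, _ | ⟨b, t⟩⟩
    · simp at hlen
    · simp at hlen
    · have hlen' : m + 1 ≤ t.length + 1 := by
        simp at hlen; omega
      rw [List.range_succ_eq_map, List.foldl_cons, List.foldl_map]
      have hstep : pvBubStep (a :: b :: t, ((s % 2 : Nat) : Int)) ((0 : Nat) : Int)
          = if b < a then (b :: a :: t, (((s + 1) % 2 : Nat) : Int))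
            else (a :: b :: t, ((s % 2 : Nat) : Int)) := by
        rw [pvBubStep_natCast]
        simp only [List.getD_cons_succ, List.getD_cons_zero, List.set_cons_succ,
          List.set_cons_zero, pvXor_mod]
      have hsucc : (fun (st : List Int × Int) (k : Nat) => pvBubStep st ((k.succ : Nat) : Int))
          = fun st k => pvBubStep st ((k + 1 : Nat) : Int) := by
        funext st k; rfl
      by_cases hba : b < a
      · rw [hstep, if_pos hba, hsucc, foldl_bubstep_cons,
          ih (a :: t) (s + 1) (by simpa using hlen')]
        simp only [pvPass, if_pos hba]
        have h3 : (s + 1 + (pvPass (a :: t) m).2) % 2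
            = (s + ((pvPass (a :: t) m).2 + 1)) % 2 := by omega
        rw [h3]
      · rw [hstep, if_neg hba, hsucc, foldl_bubstep_cons,
          ih (b :: t) s (by simpa using hlen')]
        simp only [pvPass, if_neg hba]

theorem pvPass_perm : ∀ (m : Nat) (l : List Int), (pvPass l m).1.Perm l := by
  intro m
  induction m with
  | zero => intro l; simp [pvPass]
  | succ m ih =>
    intro l
    rcases l with _ | ⟨a, _ | ⟨b, t⟩⟩
    · simp [pvPass]
    · simp [pvPass]
    · by_cases hba : b < a
      · simp only [pvPass, if_pos hba]
        exact ((ih (a :: t)).cons b).trans (List.Perm.swap a b t)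
      · simp only [pvPass, if_neg hba]
        exact (ih (b :: t)).cons a

theorem pvPass_inv : ∀ (m : Nat) (l : List Int),
    pvInv (pvPass l m).1 + (pvPass l m).2 = pvInv l := by
  intro m
  induction m with
  | zero => intro l; simp [pvPass]
  | succ m ih =>
    intro l
    rcases l with _ | ⟨a, _ | ⟨b, t⟩⟩
    · simp [pvPass]
    · simp [pvPass]
    · by_cases hba : b < a
      · have hna : ¬ (a < b) := not_lt.mpr (le_of_lt hba)
        have hc : (pvPass (a :: t) m).1.countP (fun y => decide (y < b))
            = (a :: t).countP (fun y => decide (y < b)) :=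
          (pvPass_perm m (a :: t)).countP_eq _
        have e1 : (a :: t).countP (fun y => decide (y < b))
            = t.countP (fun y => decide (y < b)) := by
          simp [List.countP_cons, hna]
        have hih := ih (a :: t)
        rw [show pvInv (a :: t) = t.countP (fun y => decide (y < a)) + pvInv t from rfl] at hih
        simp only [pvPass, if_pos hba]
        rw [show pvInv (b :: (pvPass (a :: t) m).1)
              = (pvPass (a :: t) m).1.countP (fun y => decide (y < b))
                + pvInv (pvPass (a :: t) m).1 from rfl,
            hc, e1,
            show pvInv (a :: b :: t)
              = (b :: t).countP (fun y => decide (y < a)) + pvInv (b :: t) from rfl,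
            show pvInv (b :: t) = t.countP (fun y => decide (y < b)) + pvInv t from rfl,
            show (b :: t).countP (fun y => decide (y < a))
              = t.countP (fun y => decide (y < a)) + 1 by simp [List.countP_cons, hba]]
        omega
      · have hc : (pvPass (b :: t) m).1.countP (fun y => decide (y < a))
            = (b :: t).countP (fun y => decide (y < a)) :=
          (pvPass_perm m (b :: t)).countP_eq _
        have e2 : (b :: t).countP (fun y => decide (y < a))
            = t.countP (fun y => decide (y < a)) := by
          simp [List.countP_cons, hba]
        have hih := ih (b :: t)
        simp only [pvPass, if_neg hba]
        rw [show pvInv (a :: (pvPass (b :: t) m).1)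
              = (pvPass (b :: t) m).1.countP (fun y => decide (y < a))
                + pvInv (pvPass (b :: t) m).1 from rfl,
            hc, e2,
            show pvInv (a :: b :: t)
              = (b :: t).countP (fun y => decide (y < a)) + pvInv (b :: t) from rfl,
            e2]
        omega

theorem pvPass_append : ∀ (m : Nat) (u w : List Int), u.length = m + 1 →
    pvPass (u ++ w) m = ((pvPass u m).1 ++ w, (pvPass u m).2) := by
  intro m
  induction m with
  | zero => intro u w _; simp [pvPass]
  | succ m ih =>
    intro u w hu
    rcases u with _ | ⟨a, _ | ⟨b, t⟩⟩
    · simp at hu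
    · simp at hu
    · have ht : (b :: t).length = m + 1 := by simp at hu ⊢; omega
      have ht' : (a :: t).length = m + 1 := by simp at hu ⊢; omega
      by_cases hba : b < a
      · simp only [List.cons_append, pvPass, if_pos hba]
        rw [show a :: (t ++ w) = (a :: t) ++ w from rfl, ih (a :: t) w ht']
      · simp only [List.cons_append, pvPass, if_neg hba]
        rw [show b :: (t ++ w) = (b :: t) ++ w from rfl, ih (b :: t) w ht]

theorem pvPass_last : ∀ (m : Nat) (l : List Int), l.length ≤ m + 1 → l ≠ [] →
    ∃ l' c, (pvPass l m).1 = l' ++ [c] ∧ ∀ x ∈ l', x ≤ c := by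
  intro m
  induction m with
  | zero =>
    intro l hlen hne
    rcases l with _ | ⟨x, _ | ⟨y, t⟩⟩
    · exact absurd rfl hne
    · exact ⟨[], x, by simp [pvPass], by simp⟩
    · simp at hlen
  | succ m ih =>
    intro l hlen hne
    rcases l with _ | ⟨a, _ | ⟨b, t⟩⟩
    · exact absurd rfl hne
    · exact ⟨[], a, by simp [pvPass], by simp⟩
    · have hlt : (a :: t).length ≤ m + 1 := by simp at hlen ⊢; omega
      have hlt' : (b :: t).length ≤ m + 1 := by simp at hlen ⊢; omega
      by_cases hba : b < a
      · obtain ⟨l', c, heq, hdom⟩ := ih (a :: t) hlt (by simp)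
        have hac : a ≤ c := by
          have hmem : a ∈ (pvPass (a :: t) m).1 :=
            (pvPass_perm m (a :: t)).mem_iff.mpr (by simp)
          rw [heq] at hmem
          rcases List.mem_append.mp hmem with h1 | h2
          · exact hdom a h1
          · simp at h2; omega
        refine ⟨b :: l', c, ?_, ?_⟩
        · simp only [pvPass, if_pos hba, heq]
          rfl
        · intro x hx
          rcases List.mem_cons.mp hx with rfl | h2
          · exact le_trans (le_of_lt hba) hac
          · exact hdom x h2
      · obtain ⟨l', c, heq, hdom⟩ := ih (b :: t) hlt' (by simp)
        have hbc : b ≤ c := by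
          have hmem : b ∈ (pvPass (b :: t) m).1 :=
            (pvPass_perm m (b :: t)).mem_iff.mpr (by simp)
          rw [heq] at hmem
          rcases List.mem_append.mp hmem with h1 | h2
          · exact hdom b h1
          · simp at h2; omega
        refine ⟨a :: l', c, ?_, ?_⟩
        · simp only [pvPass, if_neg hba, heq]
          rfl
        · intro x hx
          rcases List.mem_cons.mp hx with rfl | h2
          · exact le_trans (not_lt.mp hba) hbc
          · exact hdom x h2

-- the outer loop invariant: after i passes the state is (u ++ w, parity of s), where the
-- suffix w is sorted and dominates u, and s swaps have happened so far
theorem outer_inv (arr : List Int) : ∀ (i : Nat), i ≤ arr.length →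
    ∃ (u w : List Int) (s : Nat),
      (List.range i).foldl
          (fun st j => (PySem.List.pyRange 0 ((arr.length : Int) - ((j : Nat) : Int) - 1) 1).foldl
            pvBubStep st) (arr, 0)
        = (u ++ w, ((s % 2 : Nat) : Int))
      ∧ (u ++ w).Perm arr ∧ u.length = arr.length - i
      ∧ w.Pairwise (· ≤ ·) ∧ (∀ x ∈ u, ∀ y ∈ w, x ≤ y)
      ∧ pvInv (u ++ w) + s = pvInv arr := by
  intro i
  induction i with
  | zero =>
    intro _
    exact ⟨arr, [], 0, by simp, by simp, by simp, by simp, by simp, by simp⟩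
  | succ i ih =>
    intro hi
    obtain ⟨u, w, s, heq, hperm, hulen, hwsort, hdom, hinv⟩ := ih (by omega)
    rw [List.range_succ, List.foldl_append, List.foldl_cons, List.foldl_nil, heq]
    have hrange : (arr.length : Int) - ((i : Nat) : Int) - 1
        = ((arr.length - i - 1 : Nat) : Int) := by
      have : i + 1 ≤ arr.length := hi
      push_cast [Nat.cast_sub (by omega : i ≤ arr.length)]
      omega
    rw [hrange, PySem.List.pyRange_zero_nat, List.foldl_map]
    have hlw : (u ++ w).length = arr.length := hperm.length_eq
    have hmlen : (arr.length - i - 1) + 1 ≤ (u ++ w).length := by omega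
    rw [inner_bridge (arr.length - i - 1) (u ++ w) s hmlen]
    have hu1 : u.length = (arr.length - i - 1) + 1 := by
      simp only [List.length_append] at hlw
      omega
    rw [pvPass_append (arr.length - i - 1) u w hu1]
    obtain ⟨u', c, hsplit, hdom'⟩ := pvPass_last (arr.length - i - 1) u (by omega) (by
      intro h
      rw [h] at hu1
      simp at hu1)
    have hupm : (pvPass u (arr.length - i - 1)).1.Perm u := pvPass_perm _ u
    have hmemu : ∀ x ∈ (pvPass u (arr.length - i - 1)).1, x ∈ u :=
      fun x hx => hupm.mem_iff.mp hx
    refine ⟨u', c :: w, s + (pvPass (u ++ w) (arr.length - i - 1)).2, ?_, ?_, ?_, ?_, ?_, ?_⟩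
    · rw [pvPass_append (arr.length - i - 1) u w hu1, hsplit]
      congr 1
      simp
    · have hEq : (pvPass u (arr.length - i - 1)).1 ++ w = u' ++ c :: w := by
        rw [hsplit]; simp
      rw [← hEq]
      exact (hupm.append_right w).trans hperm
    · have hL : (pvPass u (arr.length - i - 1)).1.length = u.length := hupm.length_eq
      rw [hsplit] at hL
      simp only [List.length_append, List.length_cons, List.length_nil] at hL
      omega
    · refine List.pairwise_cons.mpr ⟨?_, hwsort⟩
      intro y hy
      have hcu : c ∈ u := hmemu c (by rw [hsplit]; simp)
      exact hdom c hcu y hy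
    · intro x hx y hy
      have hxu : x ∈ u := hmemu x (by rw [hsplit]; simp [hx])
      rcases List.mem_cons.mp hy with rfl | hy'
      · exact hdom' x hx
      · exact hdom x hxu y hy'
    · have hpinv := pvPass_inv (arr.length - i - 1) (u ++ w)
      rw [pvPass_append (arr.length - i - 1) u w hu1] at hpinv
      dsimp only at hpinv
      have hK : (pvPass (u ++ w) (arr.length - i - 1)).2
          = (pvPass u (arr.length - i - 1)).2 := by
        rw [pvPass_append (arr.length - i - 1) u w hu1]
      have hEq : u' ++ c :: w = (pvPass u (arr.length - i - 1)).1 ++ w := by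
        rw [hsplit]; simp
      rw [hEq, hK]
      omega

theorem sort_parity_main (arr : List Int) :
    sort_with_parity_py arr = sort_with_parity_py_alt arr := by
  obtain ⟨u, w, s, heq, hperm, hulen, hwsort, _, hinv⟩ :=
    outer_inv arr arr.length (le_refl _)
  have hu : u = [] := by
    rcases u with _ | ⟨x, u⟩
    · rfl
    · simp at hulen
  subst hu
  simp only [List.nil_append] at heq hperm hinv
  have hs : s = pvInv arr := by
    have := pvInv_eq_zero_of_sorted hwsort
    omega
  obtain ⟨mp, msort, mc⟩ := pvMsort_spec arr
  have hA : sort_with_parity_py arr = (w, ((s % 2 : Nat) : Int)) := by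
    rw [← heq]
    simp only [sort_with_parity_py, PySem.List.pyRange_zero_nat, List.foldl_map]
  have hlist : w = (pvMsort arr).1 := by
    refine List.eq_of_perm_of_sorted ?_ hwsort msort (hperm.trans mp.symm)
    intro a b _ _ h1 h2
    omega
  have hmod : PySem.Int.mod ((pvInv arr : Nat) : Int) 2 = (((pvInv arr) % 2 : Nat) : Int) := by
    rw [PySem.Int.mod_eq_emod_of_pos (by norm_num)]
    push_cast
    rfl
  rw [hA, hlist, hs]
  simp only [sort_with_parity_py_alt]
  rw [mc, hmod]

-- ===== VERDICT (by name: the statement is the Claim_ definition above) =====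
theorem sort_with_parity_py_spec : Claim_equal_sort_with_parity_py := by
  intro arr _
  show sort_with_parity_py arr = sort_with_parity_py_alt arr
  exact sort_parity_main arr
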